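-- pv_equiv track=rewrite | github.com/jramaswami/Binary_Search_Python | ascending_cards.py | solve
-- ===== SOURCE A (Python) =====
-- import collections
--
-- def solve(cards):
--     cards.sort()
--     deck = collections.deque(range(len(cards)))
--     order = []
--     while deck:
--         order.append(deck.popleft())
--         deck.rotate(-1)
--     soln = list(cards)
--     for i, c in zip(order, cards):
--         soln[i] = c
--     return soln
-- ===== SOURCE B (Python) =====
-- import collections
--
-- def solve(cards):
--     # Reverse simulation: sort in place (same mutation as A), then rebuild the
--     # deck by inverting the deal-and-rotate step, largest card first.
--     cards.sort()
--     d = collections.deque()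
--     for x in reversed(cards):
--         if d:
--             d.appendleft(d.pop())
--         d.appendleft(x)
--     return list(d)
-- ===== Notes on version B (the rewrite author's own statement) =====
-- stated objective: alternative
-- what changed: Instead of simulating the deal on an index deque to build a permutation and scatter-assigning the sorted cards through it, B builds the answer directly by running the deal in reverse: iterating the sorted cards from largest to smallest, rotating the deck right and prepending each card.
import Mathlib
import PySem

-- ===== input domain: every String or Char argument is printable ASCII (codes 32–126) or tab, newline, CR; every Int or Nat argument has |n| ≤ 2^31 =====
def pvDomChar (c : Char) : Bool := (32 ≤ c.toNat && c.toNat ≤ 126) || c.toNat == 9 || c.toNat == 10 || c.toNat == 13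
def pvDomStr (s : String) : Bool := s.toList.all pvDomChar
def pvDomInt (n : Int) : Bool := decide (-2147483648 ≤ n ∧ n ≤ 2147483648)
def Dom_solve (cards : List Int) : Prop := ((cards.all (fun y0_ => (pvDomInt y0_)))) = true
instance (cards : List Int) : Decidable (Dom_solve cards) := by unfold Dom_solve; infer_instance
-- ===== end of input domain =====

-- B replaces A's index-permutation-and-scatter step by a direct reverse simulation of the
-- deal (rotate the deck right, prepend the next-largest sorted card); equivalence is about the
-- RETURN value (both Pythons also sort the argument in place, the same observable mutation).

-- ===== PORT A =====
-- rotate left by one: deque.rotate(-1)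
def rotl {α : Type} (l : List α) : List α :=
  match l with
  | [] => []
  | a :: s => s ++ [a]

theorem rotl_length {α : Type} (l : List α) : (rotl l).length = l.length := by
  cases l <;> simp [rotl]

-- the while loop of A: pop the front onto `order`, rotate the deck left
def dealLoop (deck : List Nat) (order : List Nat) : List Nat :=
  match deck with
  | [] => order
  | h :: t => dealLoop (rotl t) (order ++ [h])
termination_by deck.length
decreasing_by simp [rotl_length]

def solve (cards : List Int) : List Int :=
  let s := PySem.List.sorted cards (fun x => x) false
  let order := dealLoop (List.range s.length) []
  (order.zip s).foldl (fun soln p => soln.set p.1 p.2) s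

-- ===== PORT B =====
-- rotate right by one: d.appendleft(d.pop())
def rotr {α : Type} (l : List α) : List α :=
  match l.getLast? with
  | none => []
  | some a => a :: l.dropLast

def solve_alt (cards : List Int) : List Int :=
  let s := PySem.List.sorted cards (fun x => x) false
  s.reverse.foldl (fun d x => x :: (if d.isEmpty then d else rotr d)) []

-- ===== PRECONDITION & SPEC =====
def Spec_solve (cards : List Int) (out : List Int) : Prop := out = solve_alt cards
instance (cards : List Int) (out : List Int) : Decidable (Spec_solve cards out) := by unfold Spec_solve; infer_instance

-- ===== CLAIM (what is proved, stated in full; the proofs are below) =====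
def Claim_equal_solve : Prop := ∀ (cards : List Int), Dom_solve cards → Spec_solve cards (solve cards)

-- ===== LEMMAS AND PROOFS =====

-- the forward deal as a plain recursive function
def deal {α : Type} (l : List α) : List α :=
  match l with
  | [] => []
  | h :: t => h :: deal (rotl t)
termination_by l.length
decreasing_by simp [rotl_length]

-- one inverse step: rotate right then prepend
def dstep {α : Type} (x : α) (d : List α) : List α := x :: rotr d

def deck {α : Type} (s : List α) : List α := s.foldr dstep []

theorem rotr_nil {α : Type} : rotr ([] : List α) = [] := rfl

theorem rotr_concat {α : Type} (s : List α) (a : α) : rotr (s ++ [a]) = a :: s := by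
  simp [rotr]

theorem rotr_rotl {α : Type} (l : List α) : rotr (rotl l) = l := by
  cases l with
  | nil => rfl
  | cons a s => simp [rotl, rotr_concat]

theorem rotl_map {α β : Type} (f : α → β) (l : List α) :
    rotl (l.map f) = (rotl l).map f := by
  cases l <;> simp [rotl]

theorem deck_deal {α : Type} (d : List α) : deck (deal d) = d := by
  induction d using deal.induct with
  | case1 => simp [deal, deck]
  | case2 h t ih =>
      rw [deal]
      show dstep h (deck (deal (rotl t))) = h :: t
      rw [ih, dstep, rotr_rotl]

theorem deal_perm {α : Type} (d : List α) : (deal d).Perm d := by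
  induction d using deal.induct with
  | case1 => simp [deal]
  | case2 h t ih =>
      rw [deal]
      refine List.Perm.cons h (ih.trans ?_)
      cases t with
      | nil => rfl
      | cons a s => simpa [rotl] using List.perm_append_comm (l₁ := s) (l₂ := [a])

theorem deal_map {α β : Type} (f : α → β) (l : List α) :
    deal (l.map f) = (deal l).map f := by
  induction l using deal.induct with
  | case1 => simp [deal]
  | case2 h t ih =>
      rw [List.map_cons, deal, deal, rotl_map, ih, List.map_cons]

theorem dealLoop_eq (deck acc : List Nat) : dealLoop deck acc = acc ++ deal deck := by
  induction deck using deal.induct generalizing acc with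
  | case1 => simp [dealLoop, deal]
  | case2 h t ih => rw [dealLoop, deal, ih]; simp

-- the scatter loop of A
def scatter (l : List Int) (ord : List Nat) (vals : List Int) : List Int :=
  (ord.zip vals).foldl (fun a p => a.set p.1 p.2) l

theorem scatter_cons (l : List Int) (i : Nat) (ord : List Nat) (c : Int) (vals : List Int) :
    scatter l (i :: ord) (c :: vals) = scatter (l.set i c) ord vals := rfl

theorem scatter_length (ord : List Nat) (vals l : List Int) :
    (scatter l ord vals).length = l.length := by
  induction ord generalizing vals l with
  | nil => simp [scatter]
  | cons j ord' ih =>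
      cases vals with
      | nil => simp [scatter]
      | cons c vals' => rw [scatter_cons, ih, List.length_set]

theorem getD_scatter_notmem (ord : List Nat) (vals l : List Int) (i : Nat)
    (h : i ∉ ord) : (scatter l ord vals).getD i 0 = l.getD i 0 := by
  induction ord generalizing vals l with
  | nil => simp [scatter]
  | cons j ord' ih =>
      cases vals with
      | nil => simp [scatter]
      | cons c vals' =>
          rw [scatter_cons, ih _ _ (fun hm => h (List.mem_cons_of_mem _ hm))]
          have hij : i ≠ j := fun he => h (he ▸ List.mem_cons_self)
          simp [List.getD_eq_getElem?_getD, List.getElem?_set_ne (Ne.symm hij)]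

theorem map_getD_scatter (ord : List Nat) (vals l : List Int)
    (hnd : ord.Nodup) (hlen : ord.length = vals.length)
    (hbound : ∀ i ∈ ord, i < l.length) :
    ord.map (fun i => (scatter l ord vals).getD i 0) = vals := by
  induction ord generalizing vals l with
  | nil => simp [(List.length_eq_zero_iff.mp hlen.symm)]
  | cons j ord' ih =>
      cases vals with
      | nil => simp at hlen
      | cons c vals' =>
          rw [scatter_cons, List.map_cons]
          have hj : j ∉ ord' := (List.nodup_cons.mp hnd).1
          have hjl : j < l.length := hbound j List.mem_cons_self
          have hhead : (scatter (l.set j c) ord' vals').getD j 0 = c := by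
            rw [getD_scatter_notmem _ _ _ _ hj]
            simp [List.getD_eq_getElem?_getD, List.getElem?_set_self hjl]
          have htail := ih vals' (l.set j c) (List.nodup_cons.mp hnd).2
            (by simp at hlen; exact hlen)
            (fun i hi => by simp [hbound i (List.mem_cons_of_mem _ hi)])
          rw [hhead, htail]

theorem map_getD_range (l : List Int) :
    (List.range l.length).map (fun i => l.getD i 0) = l := by
  apply List.ext_getElem
  · simp
  · intro i h1 h2
    simp [List.getD_eq_getElem?_getD, List.getElem?_eq_getElem h2]

theorem solve_alt_eq_deck (cards : List Int) :
    solve_alt cards = deck (PySem.List.sorted cards (fun x => x) false) := by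
  unfold solve_alt deck
  rw [List.foldl_reverse]
  congr 1
  funext x d
  show (x :: (if d.isEmpty then d else rotr d)) = dstep x d
  cases d <;> simp [dstep, rotr_nil]

theorem scatter_deal_eq_deck (s : List Int) :
    scatter s (deal (List.range s.length)) s = deck s := by
  have hperm : (deal (List.range s.length)).Perm (List.range s.length) := deal_perm _
  have hnd := hperm.nodup_iff.mpr List.nodup_range
  have hlen : (deal (List.range s.length)).length = s.length := by
    simpa using hperm.length_eq
  have hbound : ∀ i ∈ deal (List.range s.length), i < s.length := fun i hi =>
    List.mem_range.mp (hperm.mem_iff.mp hi)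
  have hslen : (scatter s (deal (List.range s.length)) s).length = s.length :=
    scatter_length _ _ _
  have hdeal : deal (scatter s (deal (List.range s.length)) s) = s := by
    conv_lhs => rw [← map_getD_range (scatter s (deal (List.range s.length)) s), hslen]
    rw [deal_map, map_getD_scatter _ _ _ hnd hlen hbound]
  calc scatter s (deal (List.range s.length)) s
      = deck (deal (scatter s (deal (List.range s.length)) s)) := (deck_deal _).symm
    _ = deck s := by rw [hdeal]

theorem solve_eq_solve_alt (cards : List Int) : solve cards = solve_alt cards := by
  unfold solve
  rw [solve_alt_eq_deck]
  simp only [dealLoop_eq, List.nil_append]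
  exact scatter_deal_eq_deck _

-- ===== VERDICT (by name: the statement is the Claim_ definition above) =====
theorem solve_spec : Claim_equal_solve := by
  intro cards _
  unfold Spec_solve
  exact solve_eq_solve_alt cards
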